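-- pv_equiv track=rewrite | github.com/max4c/byu-cs312 | projects/project2-convex-hull/convex_hull.py | add_left_side
-- ===== SOURCE A (Python) =====
-- def add_left_side(top_point,low_point,points,side_points):
--     # bottom to top
--
--     if top_point != low_point:
--         i = points.index(low_point)
--         while True:
--             point_1 = points[i]
--             point_2 = points[(i + 1) % len(points)]
--             side_points.append(point_1)
--             side_points.append(point_2)
--             if(point_2 == top_point):
--                 break
--             else:
--                 i = (i + 1) % len(points)
--     else:
--         side_points.append(top_point)
--
--     return side_points
-- ===== SOURCE B (Python) =====
-- def add_left_side(top_point, low_point, points, side_points):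
--     # bottom to top: rotate so the walk is a plain list scan, then pair adjacent
--     if top_point == low_point:
--         side_points.append(top_point)
--         return side_points
--     j = points.index(low_point)
--     rot = points[j:] + points[:j]
--     k = rot.index(top_point, 1)
--     path = rot[:k + 1]
--     for a, b in zip(path, path[1:]):
--         side_points.append(a)
--         side_points.append(b)
--     return side_points
-- ===== Notes on version B (the rewrite author's own statement) =====
-- stated objective: alternative
-- what changed: Replaces A's cyclic while-loop with modular index stepping by a rotation of the list (rot = points[j:]+points[:j]) followed by a plain scan: find top in rot, cut the path prefix, and emit adjacent pairs with zip.
import Mathlib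
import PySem

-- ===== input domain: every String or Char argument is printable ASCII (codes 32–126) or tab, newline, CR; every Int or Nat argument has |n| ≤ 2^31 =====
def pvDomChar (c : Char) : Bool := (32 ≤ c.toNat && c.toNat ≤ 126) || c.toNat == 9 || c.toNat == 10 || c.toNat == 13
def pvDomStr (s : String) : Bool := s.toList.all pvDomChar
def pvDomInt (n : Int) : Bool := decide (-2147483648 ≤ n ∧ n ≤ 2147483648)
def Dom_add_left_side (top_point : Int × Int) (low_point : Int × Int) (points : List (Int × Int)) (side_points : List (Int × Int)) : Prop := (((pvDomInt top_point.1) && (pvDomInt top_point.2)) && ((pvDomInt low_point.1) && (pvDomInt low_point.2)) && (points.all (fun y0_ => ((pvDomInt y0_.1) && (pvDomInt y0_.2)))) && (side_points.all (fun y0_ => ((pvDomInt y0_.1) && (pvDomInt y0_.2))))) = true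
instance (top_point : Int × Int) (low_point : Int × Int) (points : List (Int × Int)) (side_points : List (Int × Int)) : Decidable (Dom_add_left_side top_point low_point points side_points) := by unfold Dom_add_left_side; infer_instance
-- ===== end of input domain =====

-- B rotates the list once and pairs adjacent path elements instead of A's cyclic modular
-- while-loop; same cost, different decomposition. Both Pythons mutate side_points in place;
-- the equivalence proved here is about the returned list (which is that mutated list).

-- ===== PORT A =====
-- the 'while True' loop; fuel = len(points) suffices under Pre_ (on fuel exhaustion,
-- i.e. exactly where the Python loop would never terminate, it just returns the accumulator)
def addLeftLoopA (top_point : Int × Int) (points : List (Int × Int)) : Nat → Nat → List (Int × Int) → List (Int × Int)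
  | 0, _, side_points => side_points
  | fuel+1, i, side_points =>
    match points[i]?, points[(i + 1) % points.length]? with
    | some point_1, some point_2 =>
      let side_points := side_points ++ [point_1] ++ [point_2]
      if point_2 = top_point then side_points
      else addLeftLoopA top_point points fuel ((i + 1) % points.length) side_points
    | _, _ => side_points   -- IndexError: unreachable (i is always < len(points) here)

def add_left_side (top_point : Int × Int) (low_point : Int × Int) (points : List (Int × Int)) (side_points : List (Int × Int)) : List (Int × Int) :=
  if top_point ≠ low_point then
    match PySem.List.index? points low_point with
    | some i => addLeftLoopA top_point points points.length i side_points
    | none => side_points   -- points.index raises ValueError: excluded by Pre_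
  else side_points ++ [top_point]

-- ===== PORT B =====
-- 'for a, b in zip(path, path[1:]): side_points.append(a); side_points.append(b)'
def pairAppend (side_points : List (Int × Int)) (path : List (Int × Int)) : List (Int × Int) :=
  (path.zip path.tail).foldl (fun acc p => acc ++ [p.1] ++ [p.2]) side_points

def add_left_side_alt (top_point : Int × Int) (low_point : Int × Int) (points : List (Int × Int)) (side_points : List (Int × Int)) : List (Int × Int) :=
  if top_point = low_point then side_points ++ [top_point]
  else
    match PySem.List.index? points low_point with
    | none => side_points   -- points.index raises ValueError: excluded by Pre_
    | some j =>
      let rot := points.drop j ++ points.take j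
      -- rot.index(top_point, 1) = 1 + index of top_point in rot[1:]
      match PySem.List.index? (rot.drop 1) top_point with
      | none => side_points   -- rot.index raises ValueError: excluded by Pre_
      | some k => pairAppend side_points (rot.take (k + 2))

-- ===== PRECONDITION & SPEC =====
-- Pre_ excludes only inputs where A raises ValueError (low_point absent) or never
-- terminates (top_point ≠ low_point absent from points); A returns on everything admitted.
def Pre_add_left_side (top_point : Int × Int) (low_point : Int × Int) (points : List (Int × Int)) (side_points : List (Int × Int)) : Prop :=
  top_point ≠ low_point → (low_point ∈ points ∧ top_point ∈ points)
instance (top_point : Int × Int) (low_point : Int × Int) (points : List (Int × Int)) (side_points : List (Int × Int)) : Decidable (Pre_add_left_side top_point low_point points side_points) := by unfold Pre_add_left_side; infer_instance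

def pvWitness_add_left_side : (Int × Int) × (Int × Int) × (List (Int × Int)) × (List (Int × Int)) :=
  ((0, 2), (0, 0), [(0, 0), (1, 1), (0, 2), (-1, 1)], [])

def Spec_add_left_side (top_point : Int × Int) (low_point : Int × Int) (points : List (Int × Int)) (side_points : List (Int × Int)) (out : List (Int × Int)) : Prop := out = add_left_side_alt top_point low_point points side_points
instance (top_point : Int × Int) (low_point : Int × Int) (points : List (Int × Int)) (side_points : List (Int × Int)) (out : List (Int × Int)) : Decidable (Spec_add_left_side top_point low_point points side_points out) := by unfold Spec_add_left_side; infer_instance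

-- ===== CLAIM (what is proved, stated in full; the proofs are below) =====
def Claim_equal_add_left_side : Prop := ∀ (top_point : Int × Int) (low_point : Int × Int) (points : List (Int × Int)) (side_points : List (Int × Int)), Dom_add_left_side top_point low_point points side_points → Pre_add_left_side top_point low_point points side_points → Spec_add_left_side top_point low_point points side_points (add_left_side top_point low_point points side_points)

-- ===== LEMMAS AND PROOFS =====

-- emitting a pair of a 2-element path
lemma pairAppend_pair (acc : List (Int × Int)) (a b : Int × Int) :
    pairAppend acc [a, b] = acc ++ [a] ++ [b] := by
  simp [pairAppend]

-- peeling one adjacent pair off the front of the path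
lemma pairAppend_cons2 (acc : List (Int × Int)) (a b : Int × Int) (s : List (Int × Int)) :
    pairAppend acc (a :: b :: s) = pairAppend (acc ++ [a] ++ [b]) (b :: s) := by
  simp [pairAppend]

lemma index?_cons_some_succ {α : Type} [BEq α] [LawfulBEq α] (x v : α) (t : List α) (k : Nat)
    (h : PySem.List.index? (x :: t) v = some (k + 1)) :
    x ≠ v ∧ PySem.List.index? t v = some k := by
  rcases (PySem.List.index?_eq_some_iff _ _ _).mp h with ⟨pre, suf, heq, hlen, hnm⟩
  cases pre with
  | nil => simp at hlen
  | cons y pre' =>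
    simp only [List.cons_append, List.cons.injEq] at heq
    rcases heq with ⟨rfl, rfl⟩
    refine ⟨fun hv => hnm (by simp [hv]), ?_⟩
    exact (PySem.List.index?_eq_some_iff _ _ _).mpr ⟨pre', suf, rfl, by simpa using hlen, fun hm => hnm (by simp [hm])⟩

lemma index?_cons_some_zero {α : Type} [BEq α] [LawfulBEq α] (x v : α) (t : List α)
    (h : PySem.List.index? (x :: t) v = some 0) : x = v := by
  rcases (PySem.List.index?_eq_some_iff _ _ _).mp h with ⟨pre, suf, heq, hlen, hnm⟩
  rcases List.length_eq_zero_iff.mp hlen with rfl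
  simp only [List.nil_append] at heq
  exact (List.cons_eq_cons.mp heq).1

-- the rotation advances by one list position when i steps to (i+1) % len(points)
lemma rot_succ (points : List (Int × Int)) (i : Nat) (h : i < points.length) :
    points.drop ((i + 1) % points.length) ++ points.take ((i + 1) % points.length)
      = ((points.drop i ++ points.take i).drop 1) ++ [points[i]] := by
  rcases Nat.lt_or_ge (i + 1) points.length with h1 | h1
  · have ht : points.take (i + 1) = points.take i ++ [points[i]] := by
      rw [List.take_add_one]
      simp [List.getElem?_eq_getElem h]
    have hd : points.drop i = points[i] :: points.drop (i + 1) := List.drop_eq_getElem_cons h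
    rw [Nat.mod_eq_of_lt h1, ht, hd, List.cons_append, List.drop_succ_cons, List.drop_zero]
    exact (List.append_assoc _ _ _).symm
  · have hlen : i + 1 = points.length := by omega
    have hd : points.drop i = [points[i]] := by
      rw [List.drop_eq_getElem_cons h]
      simp [hlen]
    have ht : points.take i ++ [points[i]] = points := by
      have h2 := List.take_append_drop i points
      rw [hd] at h2
      exact h2
    rw [hlen, Nat.mod_self]
    simp only [List.drop_zero, List.take_zero, List.append_nil, hd, List.singleton_append,
      List.drop_succ_cons]
    exact ht.symm

-- main loop invariant: A's cyclic loop produces exactly B's paired path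
lemma loopA_eq (top : Int × Int) (points : List (Int × Int)) :
    ∀ (k fuel i : Nat) (side : List (Int × Int)),
      k < fuel → i < points.length →
      PySem.List.index? ((points.drop i ++ points.take i).drop 1) top = some k →
      addLeftLoopA top points fuel i side
        = pairAppend side ((points.drop i ++ points.take i).take (k + 2)) := by
  intro k
  induction k with
  | zero =>
    intro fuel i side hfuel hi hidx
    obtain ⟨fuel, rfl⟩ : ∃ f, fuel = f + 1 := ⟨fuel - 1, by omega⟩
    have hd : points.drop i = points[i] :: points.drop (i + 1) := List.drop_eq_getElem_cons hi
    have hrot1 : (points.drop i ++ points.take i).drop 1 = points.drop (i + 1) ++ points.take i := by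
      rw [hd, List.cons_append, List.drop_succ_cons, List.drop_zero]
    rw [hrot1] at hidx
    rcases hc : points.drop (i + 1) ++ points.take i with _ | ⟨x, t⟩
    · rw [hc] at hidx
      simp [PySem.List.index?_eq_idxOf?, List.idxOf?] at hidx
    · rw [hc] at hidx
      have hxtop : x = top := index?_cons_some_zero x top t hidx
      have hi' : (i + 1) % points.length < points.length := Nat.mod_lt _ (by omega)
      have hrs : points.drop ((i + 1) % points.length) ++ points.take ((i + 1) % points.length)
          = (x :: t) ++ [points[i]] := by rw [rot_succ points i hi, hrot1, hc]
      have hp2 : points[(i + 1) % points.length]? = some x := by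
        have h0 := hrs
        rw [List.drop_eq_getElem_cons hi', List.cons_append, List.cons_append] at h0
        rw [List.getElem?_eq_getElem hi', (List.cons_eq_cons.mp h0).1]
      subst hxtop
      have hrot : points.drop i ++ points.take i = points[i] :: x :: t := by
        rw [hd, List.cons_append, hc]
      rw [addLeftLoopA, List.getElem?_eq_getElem hi, hp2, hrot]
      simp [pairAppend_pair]
  | succ k' ih =>
    intro fuel i side hfuel hi hidx
    obtain ⟨fuel, rfl⟩ : ∃ f, fuel = f + 1 := ⟨fuel - 1, by omega⟩
    have hd : points.drop i = points[i] :: points.drop (i + 1) := List.drop_eq_getElem_cons hi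
    have hrot1 : (points.drop i ++ points.take i).drop 1 = points.drop (i + 1) ++ points.take i := by
      rw [hd, List.cons_append, List.drop_succ_cons, List.drop_zero]
    rw [hrot1] at hidx
    rcases hc : points.drop (i + 1) ++ points.take i with _ | ⟨x, t⟩
    · rw [hc] at hidx
      simp [PySem.List.index?_eq_idxOf?, List.idxOf?] at hidx
    · rw [hc] at hidx
      obtain ⟨hxne, hidx'⟩ := index?_cons_some_succ x top t k' hidx
      have hi' : (i + 1) % points.length < points.length := Nat.mod_lt _ (by omega)
      have hrs : points.drop ((i + 1) % points.length) ++ points.take ((i + 1) % points.length)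
          = (x :: t) ++ [points[i]] := by rw [rot_succ points i hi, hrot1, hc]
      have hp2 : points[(i + 1) % points.length]? = some x := by
        have h0 := hrs
        rw [List.drop_eq_getElem_cons hi', List.cons_append, List.cons_append] at h0
        rw [List.getElem?_eq_getElem hi', (List.cons_eq_cons.mp h0).1]
      have htopt : top ∈ t := by
        have := (PySem.List.index?_isSome_iff t top).mp (by rw [hidx']; rfl)
        exact this
      have hklt : k' < t.length := (PySem.List.getElem_of_index?_eq_some hidx').1
      have hidx'' : PySem.List.index? ((points.drop ((i + 1) % points.length)
          ++ points.take ((i + 1) % points.length)).drop 1) top = some k' := by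
        rw [hrs, List.cons_append, List.drop_succ_cons, List.drop_zero,
          PySem.List.index?_append_of_mem _ htopt, hidx']
      show addLeftLoopA top points (fuel + 1) i side = _
      rw [addLeftLoopA, List.getElem?_eq_getElem hi, hp2]
      simp only [if_neg hxne]
      rw [ih fuel ((i + 1) % points.length) (side ++ [points[i]] ++ [x]) (by omega) hi' hidx'']
      rw [hrs, List.cons_append]
      have hrot : points.drop i ++ points.take i = points[i] :: x :: t := by
        rw [hd, List.cons_append, hc]
      rw [hrot]
      have h1 : (x :: (t ++ [points[i]])).take (k' + 2) = x :: t.take (k' + 1) := by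
        rw [show k' + 2 = k' + 1 + 1 from rfl, List.take_succ_cons,
          List.take_append_of_le_length (by omega)]
      have h2 : (points[i] :: x :: t).take (k' + 1 + 2) = points[i] :: x :: t.take (k' + 1) := by
        rw [show k' + 1 + 2 = k' + 2 + 1 from rfl, List.take_succ_cons,
          show k' + 2 = k' + 1 + 1 from rfl, List.take_succ_cons]
      rw [h1, h2, pairAppend_cons2]

-- ===== VERDICT (by name: the statement is the Claim_ definition above) =====
theorem add_left_side_spec : Claim_equal_add_left_side := by
  intro top_point low_point points side_points _ hPre
  unfold Spec_add_left_side add_left_side add_left_side_alt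
  by_cases h : top_point = low_point
  · simp [h]
  · obtain ⟨hlow, htop⟩ := hPre h
    rw [if_pos h, if_neg h]
    rcases hj : PySem.List.index? points low_point with _ | j
    · exact absurd ((PySem.List.index?_eq_none_iff _ _).mp hj) (not_not.mpr hlow)
    · obtain ⟨hjlt, hjval, -⟩ := PySem.List.getElem_of_index?_eq_some hj
      have hd : points.drop j = low_point :: points.drop (j + 1) := by
        rw [List.drop_eq_getElem_cons hjlt, hjval]
      have hrot : points.drop j ++ points.take j
          = low_point :: (points.drop (j + 1) ++ points.take j) := by
        rw [hd, List.cons_append]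
      have hrot1 : (points.drop j ++ points.take j).drop 1
          = points.drop (j + 1) ++ points.take j := by
        rw [hrot, List.drop_succ_cons, List.drop_zero]
      have hmemrot : top_point ∈ points.drop j ++ points.take j := by
        have hm : top_point ∈ points.take j ++ points.drop j := by
          rw [List.take_append_drop]; exact htop
        rcases List.mem_append.mp hm with h' | h' <;> exact List.mem_append.mpr (by tauto)
      have htoptl : top_point ∈ points.drop (j + 1) ++ points.take j := by
        rw [hrot] at hmemrot
        rcases List.mem_cons.mp hmemrot with h' | h'
        · exact absurd h' h
        · exact h'
      obtain ⟨k, hk⟩ := Option.isSome_iff_exists.mp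
        ((PySem.List.index?_isSome_iff _ _).mpr htoptl)
      have hklt : k < (points.drop (j + 1) ++ points.take j).length :=
        (PySem.List.getElem_of_index?_eq_some hk).1
      have hlen : (points.drop (j + 1) ++ points.take j).length = points.length - 1 := by
        simp [List.length_drop, List.length_take]
        omega
      dsimp only
      rw [hrot1, hk]
      exact loopA_eq top_point points k points.length j side_points (by omega) hjlt
        (by rw [hrot1]; exact hk)
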